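-- pv_equiv track=rewrite | github.com/solo21-12/A2SV_Progress | contest/B_Instructions.py | solve
-- ===== SOURCE A (Python) =====
-- def solve(idx, nums, dp):
--     if idx >= len(nums):
--         return 0
--     elif dp[idx] != -1:
--         return dp[idx]
--
--     with_current = nums[idx] + solve(idx + nums[idx], nums, dp)
--     dp[idx] = with_current
--     return with_current
-- ===== SOURCE B (Python) =====
-- def solve(idx, nums, dp):
--     n = len(nums)
--     if idx >= n:
--         return 0
--     # forward walk: collect the unmemoized chain on a stack, find the tail value
--     stack = []
--     i = idx
--     tail = 0
--     while i < n:
--         if dp[i] != -1: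
--             tail = dp[i]
--             break
--         stack.append(i)
--         i += nums[i]
--     # backfill in reverse order
--     while stack:
--         j = stack.pop()
--         dp[j] = nums[j] + tail
--         tail = dp[j]
--     return tail
-- ===== Notes on version B (the rewrite author's own statement) =====
-- stated objective: alternative
-- what changed: The memoized recursion is replaced by an explicit iterative forward walk along the jump chain (collecting indices on a stack until the chain leaves the array or hits a memoized cell) followed by a reverse backfill pass that writes dp and accumulates the tail sum.
import Mathlib
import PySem

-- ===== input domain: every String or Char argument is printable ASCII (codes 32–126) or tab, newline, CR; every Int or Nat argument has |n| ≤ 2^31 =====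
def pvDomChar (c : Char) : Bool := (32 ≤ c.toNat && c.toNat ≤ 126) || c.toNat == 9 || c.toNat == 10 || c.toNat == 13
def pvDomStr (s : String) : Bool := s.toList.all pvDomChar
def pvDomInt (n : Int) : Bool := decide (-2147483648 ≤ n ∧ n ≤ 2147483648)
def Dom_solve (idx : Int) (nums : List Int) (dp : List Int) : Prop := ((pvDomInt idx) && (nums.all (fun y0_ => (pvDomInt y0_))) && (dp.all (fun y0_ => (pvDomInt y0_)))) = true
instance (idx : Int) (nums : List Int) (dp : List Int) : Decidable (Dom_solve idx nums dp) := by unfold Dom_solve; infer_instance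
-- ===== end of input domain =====

-- B replaces A's memoized recursion by an iterative forward walk plus reverse backfill (objective:
-- alternative, not faster). Both Pythons mutate dp identically; the equivalence proved here is
-- about the RETURN value (the ports thread dp as explicit state).

-- ===== PORT A =====
-- A's recursion, with dp threaded as state (Python mutates it) and fuel (the Python recursion can
-- fail to terminate on cyclic/stalling chains; Pre_solve admits exactly the inputs whose chain
-- exits within pvFuel steps, and by pigeonhole a chain that exits at all exits within pvFuel
-- steps, so inside Pre_solve the fuel is never exhausted and the port is faithful to Python A).
def pvFuel (nums : List Int) (dp : List Int) : Nat := 2 * dp.length + nums.length + 2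

def solveA : Nat → Int → List Int → List Int → Int × List Int
  | 0, _, _, dp => (0, dp)
  | f+1, idx, nums, dp =>
    if idx ≥ (nums.length : Int) then (0, dp)
    else
      match PySem.List.pyGet? dp idx with
      | none => (0, dp)      -- IndexError, excluded by Pre_solve
      | some d =>
        if d ≠ -1 then (d, dp)
        else
          match PySem.List.pyGet? nums idx with
          | none => (0, dp)  -- IndexError, excluded by Pre_solve
          | some v =>
            let p := solveA f (idx + v) nums dp
            (v + p.1, PySem.List.pySetD p.2 idx (v + p.1))

def solve (idx : Int) (nums : List Int) (dp : List Int) : Int :=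
  (solveA (pvFuel nums dp) idx nums dp).1

-- ===== PORT B =====
-- the forward walk: collect the unmemoized chain on a stack, return (stack, tail value)
def walkB : Nat → Int → List Int → List Int → List Int → List Int × Int
  | 0, _, _, _, st => (st, 0)
  | f+1, i, nums, dp, st =>
    if i < (nums.length : Int) then
      match PySem.List.pyGet? dp i with
      | none => (st, 0)      -- IndexError, excluded by Pre_solve
      | some d =>
        if d ≠ -1 then (st, d)
        else
          match PySem.List.pyGet? nums i with
          | none => (st ++ [i], 0)  -- IndexError (raised after the append), excluded by Pre_solve
          | some v => walkB f (i + v) nums dp (st ++ [i])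
    else (st, 0)

-- the backfill: pop indices (the stack reversed), write dp[j] = nums[j] + tail, update tail
def backfillB : List Int → List Int → List Int → Int → Int × List Int
  | [], _, dp, tail => (tail, dp)
  | j :: rest, nums, dp, tail =>
    let w := (PySem.List.pyGet? nums j).getD 0 + tail
    backfillB rest nums (PySem.List.pySetD dp j w) w

def solve_alt (idx : Int) (nums : List Int) (dp : List Int) : Int :=
  if idx ≥ (nums.length : Int) then 0
  else
    let r := walkB (pvFuel nums dp) idx nums dp []
    (backfillB r.1.reverse nums dp r.2).1

-- ===== PRECONDITION & SPEC =====
-- Whether Python A returns is path-dependent: it returns exactly when the jump chain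
-- i -> i + nums[i] from idx exits the array or reaches a memoized cell, every visited index being
-- a valid (possibly negative, Python-style) index into dp and nums; otherwise it raises
-- IndexError or RecursionError / recurses forever (and Python B raises or loops forever on the
-- same inputs). Pre_solve states that exit condition over the iterates of the chain's step
-- function, with the pigeonhole step bound pvFuel: a chain that exits at all exits within pvFuel
-- steps, since fewer than pvFuel valid unmemoized indices exist and a revisited index means A
-- never returns. Pre_solve therefore excludes NO input on which Python A returns a value.
-- one chain step: i -> i + nums[i] (Python negative indexing; 0 if out of range, unused then)
def pvStep (nums : List Int) (i : Int) : Int := i + (PySem.List.pyGet? nums i).getD 0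

-- the chain stops (A returns) at i: i is past the array, or dp[i] is a valid memoized cell
def pvStops (nums dp : List Int) (i : Int) : Bool :=
  decide ((nums.length : Int) ≤ i) || (PySem.List.pyGet? dp i).elim false (fun d => d != -1)

-- the chain continues through i: i is in front of the array end, dp[i] is a valid unmemoized
-- cell, and nums[i] is a valid access
def pvCont (nums dp : List Int) (i : Int) : Bool :=
  decide (i < (nums.length : Int)) && (PySem.List.pyGet? dp i == some (-1))
    && (PySem.List.pyGet? nums i).isSome

def Pre_solve (idx : Int) (nums : List Int) (dp : List Int) : Prop :=
  ∃ k < pvFuel nums dp, pvStops nums dp ((pvStep nums)^[k] idx) = true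
    ∧ ∀ j < k, pvCont nums dp ((pvStep nums)^[j] idx) = true
instance (idx : Int) (nums : List Int) (dp : List Int) : Decidable (Pre_solve idx nums dp) := by
  unfold Pre_solve; infer_instance

def pvWitness_solve : Int × List Int × List Int := (0, ([1, 2], [-1, -1]))

def Spec_solve (idx : Int) (nums : List Int) (dp : List Int) (out : Int) : Prop := out = solve_alt idx nums dp
instance (idx : Int) (nums : List Int) (dp : List Int) (out : Int) : Decidable (Spec_solve idx nums dp out) := by unfold Spec_solve; infer_instance

-- ===== CLAIM (what is proved, stated in full; the proofs are below) =====
def Claim_equal_solve : Prop := ∀ (idx : Int) (nums : List Int) (dp : List Int), Dom_solve idx nums dp → Pre_solve idx nums dp → Spec_solve idx nums dp (solve idx nums dp)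

-- ===== LEMMAS AND PROOFS =====

-- the final tail returned by the backfill does not depend on the dp it threads
lemma backfillB_fst_dp (nums : List Int) :
    ∀ (rev : List Int) (t : Int) (dp dp' : List Int),
      (backfillB rev nums dp t).1 = (backfillB rev nums dp' t).1 := by
  intro rev
  induction rev with
  | nil => intro t dp dp'; simp [backfillB]
  | cons j rest ih => intro t dp dp'; simp only [backfillB]; exact ih _ _ _

-- walk + backfill computes exactly A's recursion value, for any fuel and any stack prefix
lemma walk_backfill_eq (nums dp : List Int) :
    ∀ (f : Nat) (i : Int) (st : List Int),
      (backfillB (walkB f i nums dp st).1.reverse nums dp (walkB f i nums dp st).2).1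
        = (backfillB st.reverse nums dp (solveA f i nums dp).1).1 := by
  intro f
  induction f with
  | zero => intro i st; simp [walkB, solveA]
  | succ f ih =>
    intro i st
    simp only [walkB, solveA]
    by_cases hn : i ≥ (nums.length : Int)
    · have hn' : ¬ i < (nums.length : Int) := by omega
      simp [hn, hn']
    · have hn' : i < (nums.length : Int) := by omega
      simp only [hn, hn', if_true, if_false]
      cases hdp : PySem.List.pyGet? dp i with
      | none => simp
      | some d =>
        by_cases hd : d ≠ -1
        · simp [hd]
        · simp only [hd, if_false]
          cases hnm : PySem.List.pyGet? nums i with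
          | none =>
            simp only [List.reverse_append, List.reverse_cons, List.reverse_nil,
              List.nil_append, List.singleton_append, backfillB, hnm, Option.getD_none]
            rw [backfillB_fst_dp nums st.reverse (0 + 0) _ dp]
            norm_num
          | some v =>
            rw [ih (i + v) (st ++ [i])]
            simp only [List.reverse_append, List.reverse_cons, List.reverse_nil,
              List.nil_append, List.singleton_append, backfillB, hnm, Option.getD_some]
            rw [backfillB_fst_dp nums st.reverse _ _ dp]

-- ===== VERDICT (by name: the statement is the Claim_ definition above) =====
theorem solve_spec : Claim_equal_solve := by
  intro idx nums dp _ _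
  unfold Spec_solve solve solve_alt
  by_cases hn : idx ≥ (nums.length : Int)
  · have h1 : solveA (pvFuel nums dp) idx nums dp = (0, dp) := by
      rw [pvFuel, show 2 * dp.length + nums.length + 2
            = (2 * dp.length + nums.length + 1) + 1 from rfl]
      simp only [solveA]; rw [if_pos hn]
    rw [h1, if_pos hn]
  · rw [if_neg hn]
    have h := walk_backfill_eq nums dp (pvFuel nums dp) idx []
    simpa [backfillB] using h.symm
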